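-- pv_equiv track=rewrite | github.com/Documents-FIT-HCMUS/CSC14003_IntroToAI | Lab/Lab 02/19120383/Project02_logic/PS4/SRC/solver.py | create_clause
-- ===== SOURCE A (Python) =====
-- def remove_duplicates(literals):
--     result = []
--     for literal in literals:
--         if literal not in result:
--             result.append(literal)
--     return result
--
-- def literals_sorter(literals):
--     result = literals.copy()
--
--     # store negative literals in an array
--     negations = []
--     for i in range(len(result)):
--         if len(result[i]) == 2:
--             negations.append(result[i][-1])
--
--     # remove "-" in literals to sort
--     for i in range(len(result)):
--         if len(result[i]) == 2:
--             result[i] = result[i][-1]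
--
--     negations.sort(reverse=True)
--     result.sort()
--
--     for i in range(len(result)):
--         if result[i] in negations:
--             negations.pop()
--             result[i] = "-" + result[i]
--
--     return result
--
-- def create_clause(literals_1, literals_2=None):
--     if literals_2 is None:  # code generated by python
--         literals_2 = []
--
--     if len(literals_1) == 1 and len(literals_2) == 0:
--         return literals_1[0]
--
--     result = literals_1.copy()
--     # uniquely merge two lists of literals
--     if len(literals_2) != 0:
--         for literal in literals_2:
--             if literal not in result:
--                 result.append(literal)
--
--     result = literals_sorter(result)
--     result = remove_duplicates(result)
--     clause = " OR ".join(result)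
--     return clause
-- ===== SOURCE B (Python) =====
-- def create_clause(literals_1, literals_2=None):
--     if literals_2 is None:
--         literals_2 = []
--
--     if len(literals_1) == 1 and len(literals_2) == 0:
--         return literals_1[0]
--
--     neg = set()
--     pos = set()
--     for literal in literals_1 + literals_2:
--         if len(literal) == 2:
--             neg.add(literal[-1])
--         else:
--             pos.add(literal)
--
--     parts = []
--     for key in sorted(neg | pos):
--         if key in neg:
--             parts.append("-" + key)
--         if key in pos:
--             parts.append(key)
--     return " OR ".join(parts)
-- ===== Notes on version B (the rewrite author's own statement) =====
-- stated objective: faster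
-- what changed: A strips '-' from 2-char literals, sorts negation letters descending and the stripped list ascending, re-attaches '-' via a membership-and-pop loop over lists, then deduplicates with repeated list scans; B makes one classifying pass building a negated-key set and a positive-key set and emits the clause in a single pass over the sorted key set.
import Mathlib
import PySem

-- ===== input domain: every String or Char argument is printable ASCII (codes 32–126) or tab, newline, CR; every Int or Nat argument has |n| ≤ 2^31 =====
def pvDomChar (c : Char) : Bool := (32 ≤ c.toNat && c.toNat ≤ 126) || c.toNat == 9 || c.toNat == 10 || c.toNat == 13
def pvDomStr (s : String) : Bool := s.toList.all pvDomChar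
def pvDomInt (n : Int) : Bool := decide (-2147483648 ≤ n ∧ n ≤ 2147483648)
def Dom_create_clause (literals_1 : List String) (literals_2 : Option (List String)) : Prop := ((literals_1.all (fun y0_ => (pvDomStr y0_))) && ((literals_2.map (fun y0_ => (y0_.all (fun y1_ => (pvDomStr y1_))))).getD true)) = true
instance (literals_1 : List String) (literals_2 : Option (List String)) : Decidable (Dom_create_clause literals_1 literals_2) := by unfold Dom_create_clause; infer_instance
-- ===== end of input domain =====

-- B replaces A's strip/sort-descending/pop-and-reattach/deduplicate pipeline (repeated list scans) by one
-- classifying pass into a negated/positive presence set per key, emitted in a single ordered pass over the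
-- sorted keys (objective: faster — hash sets instead of list scans; A = B on every input).

-- ===== PORT A =====

-- "-" + x and s[-1] are built char-list-wise (String.ofList / PySem.List.pyGet?), exact for every string
def pvDash (s : String) : String := String.ofList ('-' :: s.toList)
def pvLast (s : String) : String := String.ofList (((PySem.List.pyGet? s.toList (-1)).map (fun c => [c])).getD [])

def pvRemoveDuplicates (lits : List String) : List String :=
  lits.foldl (fun res l => if l ∈ res then res else res ++ [l]) []

-- one step of A's reattaching loop: membership test, pop (dropLast) on hit, write-back
def pvSorterStep (st : List String × List String) (x : String) : List String × List String :=
  if x ∈ st.1 then (st.1.dropLast, st.2 ++ [pvDash x]) else (st.1, st.2 ++ [x])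

def pvLiteralsSorter (lits : List String) : List String :=
  let negations := lits.foldl (fun ns l => if l.toList.length == 2 then ns ++ [pvLast l] else ns) []
  let result := lits.map (fun l => if l.toList.length == 2 then pvLast l else l)
  let negations2 := PySem.List.sorted negations (fun x => x) true
  let result2 := PySem.List.sorted result (fun x => x) false
  (result2.foldl pvSorterStep (negations2, [])).2

def create_clause (literals_1 : List String) (literals_2 : Option (List String)) : String :=
  let lits2 := literals_2.getD []
  if literals_1.length = 1 ∧ lits2.length = 0 then (PySem.List.pyGet? literals_1 0).getD ""
  else
    let result := literals_1
    let result := if lits2.length ≠ 0 then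
        lits2.foldl (fun res l => if l ∈ res then res else res ++ [l]) result
      else result
    PySem.Str.join " OR " (pvRemoveDuplicates (pvLiteralsSorter result))

-- ===== PORT B =====

def pvClassify (lits : List String) : PySem.Set String × PySem.Set String :=
  lits.foldl (fun st l =>
    if l.toList.length == 2 then (PySem.Set.add st.1 (pvLast l), st.2)
    else (st.1, PySem.Set.add st.2 l)) ([], [])

def pvEmit (lits : List String) : String :=
  let np := pvClassify lits
  let keys := PySem.List.sorted (PySem.Set.union np.1 np.2) (fun x => x) false
  let parts := keys.foldl (fun acc k =>
    let acc2 := if PySem.Set.contains np.1 k then acc ++ [pvDash k] else acc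
    if PySem.Set.contains np.2 k then acc2 ++ [k] else acc2) []
  PySem.Str.join " OR " parts

def create_clause_alt (literals_1 : List String) (literals_2 : Option (List String)) : String :=
  let lits2 := literals_2.getD []
  if literals_1.length = 1 ∧ lits2.length = 0 then (PySem.List.pyGet? literals_1 0).getD ""
  else pvEmit (literals_1 ++ lits2)

-- ===== PRECONDITION & SPEC =====
def Spec_create_clause (literals_1 : List String) (literals_2 : Option (List String)) (out : String) : Prop := out = create_clause_alt literals_1 literals_2
instance (literals_1 : List String) (literals_2 : Option (List String)) (out : String) : Decidable (Spec_create_clause literals_1 literals_2 out) := by unfold Spec_create_clause; infer_instance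

-- ===== CLAIM (what is proved, stated in full; the proofs are below) =====
def Claim_equal_create_clause : Prop := ∀ (literals_1 : List String) (literals_2 : Option (List String)), Dom_create_clause literals_1 literals_2 → Spec_create_clause literals_1 literals_2 (create_clause literals_1 literals_2)

-- ===== LEMMAS AND PROOFS =====

-- proof vocabulary: the negated / positive literals A and B both extract, the stripping map,
-- a functional model `mark` of A's pop-and-reattach loop, and the combined sort key both outputs follow
def negsOf (L : List String) : List String := (L.filter (fun l => l.toList.length == 2)).map pvLast
def posOf (L : List String) : List String := L.filter (fun l => !(l.toList.length == 2))
def strip1 (l : String) : String := if l.toList.length == 2 then pvLast l else l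
def mark : List String → List String → List String
  | _, [] => []
  | N, x :: S => if x ∈ N then pvDash x :: mark (N.erase x) S else x :: mark N S
def skey (u : String) : String × Nat :=
  if u.toList.length = 2 then (String.ofList u.toList.tail, 0) else (u, 1)
def klt (a b : String) : Prop := (skey a).1 < (skey b).1 ∨ ((skey a).1 = (skey b).1 ∧ (skey a).2 < (skey b).2)
def kle (a b : String) : Prop := (skey a).1 < (skey b).1 ∨ ((skey a).1 = (skey b).1 ∧ (skey a).2 ≤ (skey b).2)
def wfs (u : String) : Prop := u.toList.length = 2 → ∃ c, u.toList = ['-', c]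

theorem pvLast_of_two {l : String} {a b : Char} (h : l.toList = [a, b]) : (pvLast l).toList = [b] := by
  simp [pvLast, h, PySem.List.pyGet?, PySem.List.pyIdx?]
theorem len_pvLast {l : String} (h : l.toList.length = 2) : (pvLast l).toList.length = 1 := by
  obtain ⟨a, b, hab⟩ := List.length_eq_two.mp h
  simp [pvLast_of_two hab]
theorem dash_toList (v : String) : (pvDash v).toList = '-' :: v.toList := by simp [pvDash]
theorem skey_dash {v : String} (h : v.toList.length = 1) : skey (pvDash v) = (v, 0) := by
  simp [skey, dash_toList, h, String.ofList_toList]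
theorem skey_plain {u : String} (h : u.toList.length ≠ 2) : skey u = (u, 1) := by
  unfold skey; rw [if_neg h]

theorem skey_two {u : String} (h : u.toList.length = 2) : skey u = (String.ofList u.toList.tail, 0) := by
  unfold skey; rw [if_pos h]

theorem skey_inj {a b : String} (ha : wfs a) (hb : wfs b) (h : skey a = skey b) : a = b := by
  by_cases h2a : a.toList.length = 2 <;> by_cases h2b : b.toList.length = 2
  · rw [skey_two h2a, skey_two h2b, Prod.mk.injEq] at h
    obtain ⟨c, hc⟩ := ha h2a
    obtain ⟨d, hd⟩ := hb h2b
    apply String.toList_inj.mp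
    rw [hc, hd]
    have := h.1
    rw [hc, hd] at this
    simpa using String.ofList_inj.mp this
  · rw [skey_two h2a, skey_plain h2b, Prod.mk.injEq] at h; omega
  · rw [skey_plain h2a, skey_two h2b, Prod.mk.injEq] at h; omega
  · rw [skey_plain h2a, skey_plain h2b, Prod.mk.injEq] at h; exact h.1

theorem klt_ne {a b : String} (h : klt a b) : a ≠ b := by
  rintro rfl
  rcases h with h | ⟨-, h⟩ <;> exact absurd h (by simp)

theorem klt_of_kle_ne {a b : String} (ha : wfs a) (hb : wfs b) (h : kle a b) (hne : a ≠ b) : klt a b := by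
  rcases h with h | ⟨he, hle⟩
  · exact Or.inl h
  · by_cases h2 : (skey a).2 = (skey b).2
    · exact absurd (skey_inj ha hb (Prod.ext he h2)) hne
    · exact Or.inr ⟨he, lt_of_le_of_ne hle h2⟩

theorem klt_asymm {a b : String} (h1 : klt a b) (h2 : klt b a) : False := by
  rcases h1 with h1 | ⟨e1, h1⟩ <;> rcases h2 with h2 | ⟨e2, h2⟩
  · exact absurd (h1.trans h2) (by simp)
  · rw [e2] at h1; exact absurd h1 (by simp)
  · rw [e1] at h2; exact absurd h2 (by simp)
  · omega

theorem count_cons' (v x : String) (S : List String) :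
    (x::S).count v = S.count v + (if x = v then 1 else 0) := by simp [List.count_cons]

theorem count_erase' (v x : String) (N : List String) :
    (N.erase x).count v = N.count v - (if x = v then 1 else 0) := by simp [List.count_erase]

theorem merge_mem (l2 : List String) : ∀ (res0 : List String) (x : String),
    x ∈ l2.foldl (fun res l => if l ∈ res then res else res ++ [l]) res0 ↔ x ∈ res0 ∨ x ∈ l2 := by
  induction l2 with
  | nil => simp
  | cons l l2 ih =>
    intro res0 x
    rw [List.foldl_cons, ih]
    by_cases hl : l ∈ res0 <;>
      simp only [hl, if_true, if_false, List.mem_cons, List.mem_append, List.not_mem_nil, or_false]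
    · constructor
      · rintro (h | h)
        exacts [Or.inl h, Or.inr (Or.inr h)]
      · rintro (h | rfl | h)
        exacts [Or.inl h, Or.inl hl, Or.inr h]
    · constructor
      · rintro ((h | rfl) | h)
        exacts [Or.inl h, Or.inr (Or.inl rfl), Or.inr (Or.inr h)]
      · rintro (h | rfl | h)
        exacts [Or.inl (Or.inl h), Or.inl (Or.inr rfl), Or.inr h]

theorem strip_perm (L : List String) : (L.map strip1).Perm (negsOf L ++ posOf L) := by
  induction L with
  | nil => simp [negsOf, posOf]
  | cons l L ih =>
    by_cases h : l.toList.length == 2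
    · simp only [List.map_cons, negsOf, posOf, List.filter_cons, h, Bool.not_true, List.map_cons,
        strip1, if_true, List.cons_append]
      simpa [negsOf, posOf] using ih.cons (pvLast l)
    · simp only [List.map_cons, negsOf, posOf, List.filter_cons, h, Bool.not_false, strip1, if_false]
      simp only [Bool.not_eq_true] at h
      simp only [h, Bool.not_false, if_true, if_false, cond_false, cond_true]
      exact (ih.cons l).trans List.perm_middle.symm

theorem dropLast_eq_erase : ∀ (N : List String) (x : String), N.Pairwise (fun a b => b ≤ a) →
    x ∈ N → (∀ y ∈ N, x ≤ y) → N.dropLast = N.erase x := by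
  intro N
  induction N with
  | nil => intro x _ hx; simp at hx
  | cons y N ih =>
    intro x hp hx hmin
    by_cases hyx : y = x
    · subst hyx
      rcases List.eq_nil_or_concat N with hN | _
      · subst hN; simp
      · have hall : ∀ b ∈ N, b = y := fun b hb =>
          le_antisymm (List.rel_of_pairwise_cons hp hb) (hmin b (List.mem_cons_of_mem _ hb))
        have hrep : N = List.replicate N.length y := List.eq_replicate_of_mem hall
        have h1 : y :: N = List.replicate (N.length + 1) y := by
          rw [List.replicate_succ]; exact congrArg (y :: ·) hrep
        rw [List.erase_cons_head, h1, List.dropLast_replicate]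
        simpa using hrep.symm
    · have hxN : x ∈ N := by
        rcases List.mem_cons.mp hx with h | h
        · exact absurd h.symm hyx
        · exact h
      have hN : N ≠ [] := by rintro rfl; simp at hxN
      rw [List.dropLast_cons_of_ne_nil hN, List.erase_cons_tail (by simpa using hyx)]
      exact congrArg (y :: ·) (ih x hp.of_cons hxN (fun z hz => hmin z (List.mem_cons_of_mem _ hz)))

theorem mark_mem_weak : ∀ (S N : List String) (u : String), u ∈ mark N S →
    ∃ v ∈ S, u = v ∨ (u = pvDash v ∧ v ∈ N) := by
  intro S
  induction S with
  | nil => intro N u h; simp [mark] at h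
  | cons x S ih =>
    intro N u h
    unfold mark at h
    by_cases hx : x ∈ N <;> simp only [hx, if_true, if_false, List.mem_cons] at h
    · rcases h with rfl | h
      · exact ⟨x, List.mem_cons_self, Or.inr ⟨rfl, hx⟩⟩
      · obtain ⟨v, hv, hc⟩ := ih _ u h
        exact ⟨v, List.mem_cons_of_mem _ hv, hc.imp id (fun h' => ⟨h'.1, List.mem_of_mem_erase h'.2⟩)⟩
    · rcases h with rfl | h
      · exact ⟨u, List.mem_cons_self, Or.inl rfl⟩
      · obtain ⟨v, hv, hc⟩ := ih _ u h
        exact ⟨v, List.mem_cons_of_mem _ hv, hc⟩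

theorem mark_mem : ∀ (S N : List String), (∀ v, N.count v ≤ S.count v) → ∀ u,
    (u ∈ mark N S ↔ (∃ v ∈ N, u = pvDash v) ∨ (u ∈ S ∧ N.count u < S.count u)) := by
  intro S
  induction S with
  | nil =>
    intro N hc u
    constructor
    · intro h; simp [mark] at h
    · rintro (⟨v, hv, rfl⟩ | ⟨h, -⟩)
      · have h1 := hc v
        have h2 := List.count_pos_iff.mpr hv
        simp [List.count_nil] at h1; omega
      · simp at h
  | cons x S ih =>
    intro N hc u
    unfold mark
    by_cases hx : x ∈ N <;> simp only [hx, if_true, if_false, List.mem_cons]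
    · have hcx : 1 ≤ N.count x := List.one_le_count_iff.mpr hx
      have hcnt : ∀ v, (N.erase x).count v ≤ S.count v := by
        intro v
        have h1 := hc v
        rw [count_cons' v x S] at h1
        rw [count_erase' v x N]
        by_cases hvx : x = v <;> simp [hvx] at h1 ⊢ <;> omega
      rw [ih _ hcnt]
      constructor
      · rintro (rfl | (⟨v, hv, rfl⟩ | ⟨hu, hcu⟩))
        · exact Or.inl ⟨x, hx, rfl⟩
        · exact Or.inl ⟨v, List.mem_of_mem_erase hv, rfl⟩
        · refine Or.inr ⟨Or.inr hu, ?_⟩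
          have h1 := hc u
          rw [count_erase' u x N] at hcu
          rw [count_cons' u x S]
          by_cases hux : x = u <;> simp [hux] at hcu ⊢ <;> omega
      · rintro (⟨v, hv, rfl⟩ | ⟨hu, hcu⟩)
        · by_cases hvx : v = x
          · subst hvx; exact Or.inl rfl
          · exact Or.inr (Or.inl ⟨v, (List.mem_erase_of_ne hvx).mpr hv, rfl⟩)
        · rw [count_cons' u x S] at hcu
          by_cases hux : u = x
          · subst hux
            have hu' : u ∈ S := by
              apply List.count_pos_iff.mp
              simp at hcu; omega
            refine Or.inr (Or.inr ⟨hu', ?_⟩)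
            rw [count_erase' u u N]
            simp at hcu ⊢; omega
          · rcases hu with rfl | hu
            · exact absurd rfl hux
            · refine Or.inr (Or.inr ⟨hu, ?_⟩)
              rw [count_erase' u x N]
              simp [Ne.symm hux] at hcu ⊢
              omega
    · have hcx : N.count x = 0 := List.count_eq_zero_of_not_mem hx
      have hcnt : ∀ v, N.count v ≤ S.count v := by
        intro v
        have h1 := hc v
        rw [count_cons' v x S] at h1
        by_cases hvx : x = v
        · subst hvx; omega
        · simpa [hvx] using h1
      rw [ih _ hcnt]
      constructor
      · rintro (rfl | (⟨v, hv, rfl⟩ | ⟨hu, hcu⟩))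
        · refine Or.inr ⟨Or.inl rfl, ?_⟩
          rw [count_cons' u u S]; simp [hcx]
        · exact Or.inl ⟨v, hv, rfl⟩
        · refine Or.inr ⟨Or.inr hu, ?_⟩
          rw [count_cons' u x S]
          by_cases hux : x = u <;> simp [hux] <;> omega
      · rintro (⟨v, hv, rfl⟩ | ⟨hu, hcu⟩)
        · exact Or.inr (Or.inl ⟨v, hv, rfl⟩)
        · by_cases hux : u = x
          · subst hux; exact Or.inl rfl
          · rcases hu with rfl | hu
            · exact absurd rfl hux
            · rw [count_cons' u x S] at hcu
              simp [Ne.symm hux] at hcu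
              exact Or.inr (Or.inr ⟨hu, hcu⟩)

theorem foldl_sorterStep_eq_mark : ∀ (S N acc : List String), S.Pairwise (fun a b => a ≤ b) →
    N.Pairwise (fun a b => b ≤ a) → (∀ v, N.count v ≤ S.count v) →
    (S.foldl pvSorterStep (N, acc)).2 = acc ++ mark N S := by
  intro S
  induction S with
  | nil => intro N acc _ _ _; simp [mark]
  | cons x S ih =>
    intro N acc hS hN hc
    rw [List.foldl_cons]
    unfold mark
    by_cases hx : x ∈ N
    · have hmin : ∀ y ∈ N, x ≤ y := by
        intro y hy
        have h1 : 1 ≤ N.count y := List.one_le_count_iff.mpr hy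
        have h2 := hc y
        have h3 : y ∈ x :: S := List.count_pos_iff.mp (by omega)
        rcases List.mem_cons.mp h3 with rfl | h
        · exact le_refl _
        · exact List.rel_of_pairwise_cons hS h
      have hstep : pvSorterStep (N, acc) x = (N.erase x, acc ++ [pvDash x]) := by
        simp only [pvSorterStep]
        rw [if_pos (by simpa using hx), dropLast_eq_erase N x hN hx hmin]
      rw [hstep, if_pos hx, ih _ _ hS.of_cons (hN.sublist (List.erase_sublist ..)) ?_]
      · simp
      · intro v
        have h1 := hc v
        rw [count_cons' v x S] at h1
        rw [count_erase' v x N]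
        by_cases hvx : x = v <;> simp [hvx] at h1 ⊢ <;> omega
    · have hstep : pvSorterStep (N, acc) x = (N, acc ++ [x]) := by
        simp [pvSorterStep, hx]
      rw [hstep, if_neg hx, ih _ _ hS.of_cons hN ?_]
      · simp
      · intro v
        have h1 := hc v
        rw [count_cons' v x S] at h1
        by_cases hvx : x = v
        · subst hvx; rw [List.count_eq_zero_of_not_mem hx]; omega
        · simpa [hvx] using h1

theorem mark_pairwise : ∀ (S N : List String), S.Pairwise (fun a b => a ≤ b) →
    (∀ u ∈ S, u.toList.length ≠ 2) → (∀ v ∈ N, v.toList.length = 1) →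
    (mark N S).Pairwise kle := by
  intro S
  induction S with
  | nil => intro N _ _ _; simp [mark]
  | cons x S ih =>
    intro N hS hlenS hlenN
    have hxlen : x.toList.length ≠ 2 := hlenS x List.mem_cons_self
    have key_of : ∀ N' u, (∀ v ∈ N', v.toList.length = 1) → u ∈ mark N' S →
        ∃ v ∈ S, skey u = (v, 1) ∨ (skey u = (v, 0)) := by
      intro N' u hN' hu
      obtain ⟨v, hv, hc⟩ := mark_mem_weak S N' u hu
      rcases hc with heq | ⟨heq, hvN⟩
      · exact ⟨v, hv, Or.inl (by rw [heq]; exact skey_plain (hlenS v (List.mem_cons_of_mem _ hv)))⟩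
      · exact ⟨v, hv, Or.inr (by rw [heq]; exact skey_dash (hN' v hvN))⟩
    unfold mark
    by_cases hx : x ∈ N <;> simp only [hx, if_true, if_false]
    · refine List.pairwise_cons.mpr ⟨?_, ih _ hS.of_cons (fun u hu => hlenS u (List.mem_cons_of_mem _ hu))
        (fun v hv => hlenN v (List.mem_of_mem_erase hv))⟩
      intro u hu
      have hxk : skey (pvDash x) = (x, 0) := skey_dash (hlenN x hx)
      obtain ⟨v, hv, hk⟩ := key_of _ u (fun v hv => hlenN v (List.mem_of_mem_erase hv)) hu
      have hxv : x ≤ v := List.rel_of_pairwise_cons hS hv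
      rcases hk with hk | hk <;> rw [kle, hxk, hk] <;> rcases lt_or_eq_of_le hxv with h | h
      · exact Or.inl h
      · exact Or.inr ⟨h, by omega⟩
      · exact Or.inl h
      · exact Or.inr ⟨h, le_refl _⟩
    · refine List.pairwise_cons.mpr ⟨?_, ih _ hS.of_cons (fun u hu => hlenS u (List.mem_cons_of_mem _ hu)) hlenN⟩
      intro u hu
      have hxk : skey x = (x, 1) := skey_plain hxlen
      obtain ⟨v, hv, hc⟩ := mark_mem_weak S N u hu
      have hxv : x ≤ v := List.rel_of_pairwise_cons hS hv
      rcases hc with heq | ⟨heq, hvN⟩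
      · rw [kle, hxk, heq, skey_plain (hlenS v (List.mem_cons_of_mem _ hv))]
        rcases lt_or_eq_of_le hxv with h | h
        · exact Or.inl h
        · exact Or.inr ⟨h, le_refl _⟩
      · rw [kle, hxk, heq, skey_dash (hlenN v hvN)]
        have : x ≠ v := by rintro rfl; exact hx hvN
        exact Or.inl (lt_of_le_of_ne hxv this)

theorem foldl_add_sublist : ∀ (xs acc : List String),
    ∃ ys, xs.foldl PySem.Set.add acc = acc ++ ys ∧ ys.Sublist xs := by
  intro xs
  induction xs with
  | nil => intro acc; exact ⟨[], by simp⟩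
  | cons x xs ih =>
    intro acc
    rw [List.foldl_cons]
    by_cases hx : x ∈ acc
    · rw [PySem.Set.add_of_mem hx]
      obtain ⟨ys, h1, h2⟩ := ih acc
      exact ⟨ys, h1, h2.cons x⟩
    · rw [PySem.Set.add_of_not_mem hx]
      obtain ⟨ys, h1, h2⟩ := ih (acc ++ [x])
      exact ⟨x :: ys, by simpa using h1, h2.cons₂ x⟩

theorem dedup_sublist (xs : List String) : (PySem.List.dedup xs).Sublist xs := by
  obtain ⟨ys, h1, h2⟩ := foldl_add_sublist xs []
  rw [PySem.List.dedup_eq_ofList, PySem.Set.ofList_eq_foldl, h1]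
  simpa using h2

theorem negsOf_len {v : String} {L : List String} (h : v ∈ negsOf L) : v.toList.length = 1 := by
  obtain ⟨l, hl, rfl⟩ := List.mem_map.mp h
  exact len_pvLast (by simpa using (List.mem_filter.mp hl).2)

theorem posOf_len {u : String} {L : List String} (h : u ∈ posOf L) : u.toList.length ≠ 2 := by
  have := (List.mem_filter.mp h).2
  simpa using this

theorem negsOf_mem_congr {L L' : List String} (h : ∀ x, x ∈ L ↔ x ∈ L') (v : String) :
    v ∈ negsOf L ↔ v ∈ negsOf L' := by
  unfold negsOf
  simp only [List.mem_map, List.mem_filter]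
  exact ⟨fun ⟨l, ⟨h1, h2⟩, h3⟩ => ⟨l, ⟨(h l).mp h1, h2⟩, h3⟩,
         fun ⟨l, ⟨h1, h2⟩, h3⟩ => ⟨l, ⟨(h l).mpr h1, h2⟩, h3⟩⟩

theorem posOf_mem_congr {L L' : List String} (h : ∀ x, x ∈ L ↔ x ∈ L') (v : String) :
    v ∈ posOf L ↔ v ∈ posOf L' := by
  unfold posOf
  simp only [List.mem_filter]
  exact ⟨fun ⟨h1, h2⟩ => ⟨(h v).mp h1, h2⟩, fun ⟨h1, h2⟩ => ⟨(h v).mpr h1, h2⟩⟩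

theorem classify_eq : ∀ (L : List String) (s p : PySem.Set String),
    L.foldl (fun st l => if l.toList.length == 2 then (PySem.Set.add st.1 (pvLast l), st.2)
      else (st.1, PySem.Set.add st.2 l)) (s, p)
      = (PySem.Set.update s (negsOf L), PySem.Set.update p (posOf L)) := by
  intro L
  induction L with
  | nil => intro s p; simp [negsOf, posOf, PySem.Set.update]
  | cons l L ih =>
    intro s p
    rw [List.foldl_cons]
    by_cases h : l.toList.length == 2
    · have h2 : l.length = 2 := by simpa using h
      simp only [h, if_true]
      rw [ih]
      congr 1
      · rw [PySem.Set.update_eq_foldl, PySem.Set.update_eq_foldl]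
        simp [negsOf, List.filter_cons, h2]
      · simp [posOf, List.filter_cons, h2]
    · have h2 : ¬ l.length = 2 := by simpa using h
      simp only [h, if_false]
      rw [ih]
      congr 1
      · simp [negsOf, List.filter_cons, h2]
      · rw [PySem.Set.update_eq_foldl, PySem.Set.update_eq_foldl]
        simp [posOf, List.filter_cons, h2]

theorem removeDuplicates_eq_dedup (xs : List String) : pvRemoveDuplicates xs = PySem.List.dedup xs := by
  rw [PySem.List.dedup_eq_ofList, PySem.Set.ofList_eq_foldl]
  unfold pvRemoveDuplicates
  have hf : (fun (res : List String) (l : String) => if l ∈ res then res else res ++ [l]) = PySem.Set.add := by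
    funext res l
    by_cases h : l ∈ res
    · rw [if_pos h, PySem.Set.add_of_mem h]
    · rw [if_neg h, PySem.Set.add_of_not_mem h]
  rw [hf]

theorem classify_ofList (L : List String) :
    pvClassify L = (PySem.Set.ofList (negsOf L), PySem.Set.ofList (posOf L)) := by
  unfold pvClassify
  rw [classify_eq]
  rw [PySem.Set.update_eq_foldl, PySem.Set.update_eq_foldl,
    PySem.Set.ofList_eq_foldl, PySem.Set.ofList_eq_foldl]

theorem strip1_len (l : String) : (strip1 l).toList.length ≠ 2 := by
  unfold strip1
  by_cases h : l.toList.length == 2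
  · rw [if_pos h]
    rw [len_pvLast (by simpa using h)]
    omega
  · rw [if_neg h]
    simpa using h

def gpart (neg pos : PySem.Set String) (k : String) : List String :=
  (if k ∈ neg then [pvDash k] else []) ++ (if k ∈ pos then [k] else [])

theorem gpart_key {neg pos : PySem.Set String} (hneg : ∀ k ∈ neg, k.toList.length = 1)
    (hpos : ∀ k ∈ pos, k.toList.length ≠ 2) {k u : String} (hu : u ∈ gpart neg pos k) :
    (skey u).1 = k ∧ wfs u := by
  unfold gpart at hu
  rcases List.mem_append.mp hu with h | h
  · by_cases hk : k ∈ neg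
    · rw [if_pos hk] at h
      have heq := List.mem_singleton.mp h
      have h1 := hneg k hk
      obtain ⟨c, hc⟩ := List.length_eq_one_iff.mp h1
      refine ⟨by rw [heq, skey_dash h1], fun h2 => ⟨c, by rw [heq, dash_toList, hc]⟩⟩
    · rw [if_neg hk] at h; simp at h
  · by_cases hk : k ∈ pos
    · rw [if_pos hk] at h
      have heq := List.mem_singleton.mp h
      refine ⟨by rw [heq, skey_plain (hpos k hk)], fun h2 => absurd (by rw [← heq]; exact h2) (hpos k hk)⟩
    · rw [if_neg hk] at h; simp at h

theorem flatMap_gpart_pairwise (neg pos : PySem.Set String)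
    (hneg : ∀ k ∈ neg, k.toList.length = 1) (hpos : ∀ k ∈ pos, k.toList.length ≠ 2) :
    ∀ keys : List String, keys.Pairwise (· < ·) →
    (keys.flatMap (gpart neg pos)).Pairwise klt := by
  intro keys
  induction keys with
  | nil => intro _; simp
  | cons k ks ih =>
    intro hp
    rw [List.flatMap_cons]
    refine List.pairwise_append.mpr ⟨?_, ih hp.of_cons, ?_⟩
    · unfold gpart
      by_cases h1 : k ∈ neg <;> by_cases h2 : k ∈ pos <;>
        simp only [h1, h2, if_true, if_false, List.nil_append, List.append_nil]
      · refine List.pairwise_cons.mpr ⟨?_, by simp⟩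
        intro u hu
        rw [List.mem_singleton.mp hu, klt, skey_dash (hneg k h1), skey_plain (hpos k h2)]
        exact Or.inr ⟨rfl, by omega⟩
      · simp
      · simp
      · simp
    · intro a ha b hb
      obtain ⟨k', hk', hbk'⟩ := List.mem_flatMap.mp hb
      have h1 := (gpart_key hneg hpos ha).1
      have h2 := (gpart_key hneg hpos hbk').1
      rw [klt, h1, h2]
      exact Or.inl (List.rel_of_pairwise_cons hp hk')

theorem flatMap_gpart_mem (neg pos : PySem.Set String) (keys : List String)
    (hkeys : ∀ k, k ∈ keys ↔ k ∈ neg ∨ k ∈ pos) (u : String) :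
    u ∈ keys.flatMap (gpart neg pos) ↔ (∃ v ∈ neg, u = pvDash v) ∨ u ∈ pos := by
  rw [List.mem_flatMap]
  constructor
  · rintro ⟨k, hk, hu⟩
    unfold gpart at hu
    rcases List.mem_append.mp hu with h | h
    · by_cases h1 : k ∈ neg
      · rw [if_pos h1] at h
        exact Or.inl ⟨k, h1, List.mem_singleton.mp h⟩
      · rw [if_neg h1] at h; simp at h
    · by_cases h2 : k ∈ pos
      · rw [if_pos h2] at h
        rw [List.mem_singleton.mp h]
        exact Or.inr h2
      · rw [if_neg h2] at h; simp at h
  · rintro (⟨v, hv, rfl⟩ | hu)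
    · exact ⟨v, (hkeys v).mpr (Or.inl hv), by unfold gpart; rw [if_pos hv]; simp⟩
    · exact ⟨u, (hkeys u).mpr (Or.inr hu), by unfold gpart; rw [if_pos hu]; simp⟩

-- the central equality
theorem pipeline_eq (LA LB : List String) (h : ∀ x, x ∈ LA ↔ x ∈ LB) :
    PySem.Str.join " OR " (pvRemoveDuplicates (pvLiteralsSorter LA)) = pvEmit LB := by
  -- ===== A side =====
  set N := PySem.List.sorted ((LA.filter (fun l => l.toList.length == 2)).map pvLast) (fun x => x) true with hNdef
  set S := PySem.List.sorted (LA.map strip1) (fun x => x) false with hSdef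
  have hNperm : N.Perm (negsOf LA) := PySem.List.sorted_perm _ _ _
  have hSperm : S.Perm (LA.map strip1) := PySem.List.sorted_perm _ _ _
  have hSperm2 : S.Perm (negsOf LA ++ posOf LA) := hSperm.trans (strip_perm LA)
  have hS : S.Pairwise (fun a b => a ≤ b) := by
    simpa using PySem.List.sorted_pairwise (LA.map strip1) (fun x => x)
  have hN : N.Pairwise (fun a b => b ≤ a) := by
    simpa [negsOf] using PySem.List.sorted_pairwise_rev ((LA.filter (fun l => l.toList.length == 2)).map pvLast) (fun x => x)
  have hcnt : ∀ v, N.count v ≤ S.count v := by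
    intro v
    rw [hNperm.count_eq, hSperm2.count_eq, List.count_append]
    omega
  have hlenS : ∀ u ∈ S, u.toList.length ≠ 2 := by
    intro u hu
    obtain ⟨l, _, rfl⟩ := List.mem_map.mp (hSperm.mem_iff.mp hu)
    exact strip1_len l
  have hlenN : ∀ v ∈ N, v.toList.length = 1 := fun v hv => negsOf_len (hNperm.mem_iff.mp hv)
  have hsorter : pvLiteralsSorter LA = mark N S := by
    show ((PySem.List.sorted (LA.map strip1) (fun x => x) false).foldl pvSorterStep
      (PySem.List.sorted (LA.foldl (fun ns l => if l.toList.length == 2 then ns ++ [pvLast l] else ns) []) (fun x => x) true, [])).2 = mark N S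
    have hnegfold : LA.foldl (fun ns l => if l.toList.length == 2 then ns ++ [pvLast l] else ns) []
        = (LA.filter (fun l => l.toList.length == 2)).map pvLast := by
      simpa using PySem.List.foldl_append_if (fun l : String => l.toList.length == 2) pvLast LA []
    rw [hnegfold]
    simpa using foldl_sorterStep_eq_mark S N [] hS hN hcnt
  have hAeq : pvRemoveDuplicates (pvLiteralsSorter LA) = PySem.List.dedup (mark N S) := by
    rw [removeDuplicates_eq_dedup, hsorter]
  have wfA : ∀ u ∈ PySem.List.dedup (mark N S), wfs u := by
    intro u hu
    obtain ⟨v, hv, hc⟩ := mark_mem_weak S N u ((PySem.List.mem_dedup _ _).mp hu)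
    rcases hc with heq | ⟨heq, hvN⟩
    · intro h2; rw [heq] at h2; exact absurd h2 (hlenS v hv)
    · intro _
      obtain ⟨c, hc1⟩ := List.length_eq_one_iff.mp (hlenN v hvN)
      exact ⟨c, by rw [heq, dash_toList, hc1]⟩
  have ndA : (PySem.List.dedup (mark N S)).Nodup := PySem.List.nodup_dedup _
  have pwAkle : (PySem.List.dedup (mark N S)).Pairwise kle :=
    List.Pairwise.sublist (dedup_sublist _) (mark_pairwise S N hS hlenS hlenN)
  have pwA : (PySem.List.dedup (mark N S)).Pairwise klt := by
    refine List.Pairwise.imp_of_mem ?_ (pwAkle.and ndA)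
    intro a b ha hb hr
    exact klt_of_kle_ne (wfA a ha) (wfA b hb) hr.1 hr.2
  have memA : ∀ u, u ∈ PySem.List.dedup (mark N S) ↔
      (∃ v ∈ negsOf LA, u = pvDash v) ∨ u ∈ posOf LA := by
    intro u
    rw [PySem.List.mem_dedup, mark_mem S N hcnt u]
    constructor
    · rintro (⟨v, hv, rfl⟩ | ⟨hu, hlt⟩)
      · exact Or.inl ⟨v, hNperm.mem_iff.mp hv, rfl⟩
      · refine Or.inr (List.count_pos_iff.mp ?_)
        have e1 := hNperm.count_eq u
        have e2 : S.count u = (negsOf LA).count u + (posOf LA).count u := by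
          rw [hSperm2.count_eq, List.count_append]
        omega
    · rintro (⟨v, hv, rfl⟩ | hu)
      · exact Or.inl ⟨v, hNperm.mem_iff.mpr hv, rfl⟩
      · have e1 := hNperm.count_eq u
        have e2 : S.count u = (negsOf LA).count u + (posOf LA).count u := by
          rw [hSperm2.count_eq, List.count_append]
        have h3 : 1 ≤ (posOf LA).count u := List.one_le_count_iff.mpr hu
        refine Or.inr ⟨List.count_pos_iff.mp (by omega), by omega⟩
  -- ===== B side =====
  set neg := PySem.Set.ofList (negsOf LB) with hnegdef
  set pos := PySem.Set.ofList (posOf LB) with hposdef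
  set keys := PySem.List.sorted (PySem.Set.union neg pos) (fun x => x) false with hkeysdef
  have hnegmem : ∀ k, k ∈ neg ↔ k ∈ negsOf LB := fun k => PySem.Set.mem_ofList _ _
  have hposmem : ∀ k, k ∈ pos ↔ k ∈ posOf LB := fun k => PySem.Set.mem_ofList _ _
  have hneglen : ∀ k ∈ neg, k.toList.length = 1 := fun k hk => negsOf_len ((hnegmem k).mp hk)
  have hposlen : ∀ k ∈ pos, k.toList.length ≠ 2 := fun k hk => posOf_len ((hposmem k).mp hk)
  have hkeysmem : ∀ k, k ∈ keys ↔ k ∈ neg ∨ k ∈ pos := by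
    intro k
    rw [hkeysdef, PySem.List.mem_sorted, PySem.Set.mem_union]
  have hkeysnd : keys.Nodup :=
    (PySem.List.sorted_perm _ _ _).symm.nodup
      (PySem.Set.nodup_union neg pos (PySem.Set.nodup_ofList _))
  have hkeyspw : keys.Pairwise (· < ·) := by
    refine List.Pairwise.imp_of_mem ?_
      ((by simpa using PySem.List.sorted_pairwise (PySem.Set.union neg pos) (fun x => x) : keys.Pairwise (fun a b => a ≤ b)).and hkeysnd)
    intro a b _ _ hr
    exact lt_of_le_of_ne hr.1 hr.2
  have hemit : pvEmit LB = PySem.Str.join " OR " (keys.flatMap (gpart neg pos)) := by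
    show PySem.Str.join " OR "
      ((PySem.List.sorted (PySem.Set.union (pvClassify LB).1 (pvClassify LB).2) (fun x => x) false).foldl
        (fun acc k =>
          let acc2 := if PySem.Set.contains (pvClassify LB).1 k then acc ++ [pvDash k] else acc
          if PySem.Set.contains (pvClassify LB).2 k then acc2 ++ [k] else acc2) []) = _
    rw [classify_ofList LB]
    have hstep : (fun (acc : List String) (k : String) =>
        let acc2 := if PySem.Set.contains (PySem.Set.ofList (negsOf LB), PySem.Set.ofList (posOf LB)).1 k then acc ++ [pvDash k] else acc
        if PySem.Set.contains (PySem.Set.ofList (negsOf LB), PySem.Set.ofList (posOf LB)).2 k then acc2 ++ [k] else acc2)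
        = fun acc k => acc ++ gpart neg pos k := by
      funext acc k
      show (let acc2 := if PySem.Set.contains neg k then acc ++ [pvDash k] else acc
        if PySem.Set.contains pos k then acc2 ++ [k] else acc2) = acc ++ gpart neg pos k
      unfold gpart
      by_cases h1 : k ∈ neg <;> by_cases h2 : k ∈ pos <;>
        simp [PySem.Set.contains_iff, h1, h2]
    rw [hstep, PySem.List.foldl_append_eq_flatMap]
    rfl
  have pwB := flatMap_gpart_pairwise neg pos hneglen hposlen keys hkeyspw
  have ndB : (keys.flatMap (gpart neg pos)).Nodup := pwB.imp (fun hr => klt_ne hr)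
  have memB := flatMap_gpart_mem neg pos keys hkeysmem
  -- ===== combine =====
  have hmemeq : ∀ u, u ∈ PySem.List.dedup (mark N S) ↔ u ∈ keys.flatMap (gpart neg pos) := by
    intro u
    rw [memA u, memB u]
    constructor
    · rintro (⟨v, hv, rfl⟩ | hu)
      · exact Or.inl ⟨v, (hnegmem v).mpr ((negsOf_mem_congr h v).mp hv), rfl⟩
      · exact Or.inr ((hposmem u).mpr ((posOf_mem_congr h u).mp hu))
    · rintro (⟨v, hv, rfl⟩ | hu)
      · exact Or.inl ⟨v, (negsOf_mem_congr h v).mpr ((hnegmem v).mp hv), rfl⟩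
      · exact Or.inr ((posOf_mem_congr h u).mpr ((hposmem u).mp hu))
  have hperm : (PySem.List.dedup (mark N S)).Perm (keys.flatMap (gpart neg pos)) :=
    (List.perm_ext_iff_of_nodup ndA ndB).mpr hmemeq
  haveI : Std.Antisymm klt := ⟨fun a b h1 h2 => (klt_asymm h1 h2).elim⟩
  have heq : PySem.List.dedup (mark N S) = keys.flatMap (gpart neg pos) :=
    List.Perm.eq_of_pairwise' pwA pwB hperm
  rw [hAeq, heq, hemit]

-- ===== VERDICT (by name: the statement is the Claim_ definition above) =====
theorem create_clause_spec : Claim_equal_create_clause := by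
  intro l1 l2 _
  unfold Spec_create_clause create_clause create_clause_alt
  by_cases hg : l1.length = 1 ∧ (l2.getD []).length = 0
  · simp only [if_pos hg]
  · simp only [if_neg hg]
    by_cases h2 : (l2.getD []).length ≠ 0
    · simp only [if_pos h2]
      exact pipeline_eq _ _ (by intro x; rw [merge_mem, List.mem_append])
    · simp only [if_neg h2]
      have : l2.getD [] = [] := List.eq_nil_iff_length_eq_zero.mpr (by omega)
      exact pipeline_eq _ _ (by intro x; simp [this])
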